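-- pv_equiv track=rewrite | github.com/UntetheredWind/SIEM-Assistant-MVP | utils/query_executor.py | _parse_query_components
-- ===== SOURCE A (Python) =====
-- from typing import Dict, List, Optional, Any, Union, Tuple
--
-- def _parse_query_components(query: str) -> Dict[str, Any]:
--     """Parse KQL query into structured components"""
--     # This is a simplified parser - a full implementation would use a proper parser
--
--     # Handle parentheses
--     query = query.replace('(', ' ( ').replace(')', ' ) ')
--
--     # Split by logical operators while preserving them
--     tokens = []
--     current_token = ""
--
--     i = 0
--     while i < len(query):
--         char = query[i]
--
--         if char == '"':
--             # Handle quoted strings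
--             current_token += char
--             i += 1
--             while i < len(query) and query[i] != '"':
--                 current_token += query[i]
--                 i += 1
--             if i < len(query):
--                 current_token += query[i]  # closing quote
--         elif char in ' \t\n':
--             if current_token.strip():
--                 tokens.append(current_token.strip())
--                 current_token = ""
--         else:
--             current_token += char
--
--         i += 1
--
--     if current_token.strip():
--         tokens.append(current_token.strip())
--
--     return {"tokens": tokens}
-- ===== SOURCE B (Python) =====
-- import re
--
-- _TOKEN_RE = re.compile(r'(?:"[^"]*"?|[^ \t\n])+')
--
-- def _parse_query_components(query: str):
--     """Parse KQL query into structured components (regex-based tokenizer)."""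
--     query = query.replace('(', ' ( ').replace(')', ' ) ')
--     return {"tokens": [t.strip() for t in _TOKEN_RE.findall(query) if t.strip()]}
-- ===== Notes on version B (the rewrite author's own statement) =====
-- stated objective: idiomatic
-- what changed: Replaced the hand-written index loop with per-character string accumulation and an inner quote-scanning while loop by a single precompiled-regex findall pass whose pattern consumes quoted segments (terminated or not) whole and glues adjacent runs, followed by a strip-and-filter comprehension.
import Mathlib
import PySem

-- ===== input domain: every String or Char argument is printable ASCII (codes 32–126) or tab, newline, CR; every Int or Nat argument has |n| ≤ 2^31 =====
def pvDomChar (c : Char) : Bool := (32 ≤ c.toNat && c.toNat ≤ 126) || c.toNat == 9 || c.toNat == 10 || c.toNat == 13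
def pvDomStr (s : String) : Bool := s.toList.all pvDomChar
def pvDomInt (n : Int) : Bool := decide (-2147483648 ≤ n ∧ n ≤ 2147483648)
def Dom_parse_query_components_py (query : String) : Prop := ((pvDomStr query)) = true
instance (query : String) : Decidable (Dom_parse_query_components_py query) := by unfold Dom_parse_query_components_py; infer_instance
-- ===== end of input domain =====

-- B replaces A's index loop + inner quote-scanning while loop by a single regex-findall pass
-- (pattern (?:"[^"]*"?|[^ \t\n])+) followed by a strip-and-filter comprehension (objective: idiomatic).


-- chars of Python's `' \t\n'` (A's membership test; also the regex class [^ \t\n] in B)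
def pvSep (c : Char) : Bool := c = ' ' || c = '\t' || c = '\n'

-- ===== PORT A =====
-- A's inner `while i < len(query) and query[i] != '"'` loop: consumed chars and the remainder
def pvAQuote : List Char → List Char × List Char
  | [] => ([], [])
  | c :: rest => if c = '"' then ([], c :: rest)
                 else ((pvAQuote rest).1.cons c, (pvAQuote rest).2)

-- termination lemma for pvALoop (cited in its decreasing_by)
theorem pvAQuote_snd_le (cs : List Char) : (pvAQuote cs).2.length ≤ cs.length := by
  induction cs with
  | nil => simp [pvAQuote]
  | cons c rest ih => by_cases h : c = '"' <;> simp [pvAQuote, h] <;> omega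

-- A's outer `while i < len(query)` loop: state = (remaining chars, current_token, tokens)
def pvALoop : List Char → List Char → List (List Char) → List (List Char)
  | [], cur, toks =>
      if PySem.Chars.strip cur = [] then toks else toks ++ [PySem.Chars.strip cur]
  | c :: rest, cur, toks =>
      if c = '"' then
        match hq : pvAQuote rest with
        | (mid, []) => pvALoop [] (cur ++ c :: mid) toks
        | (mid, q :: rest') => pvALoop rest' (cur ++ c :: (mid ++ [q])) toks
      else if pvSep c then
        if PySem.Chars.strip cur = [] then pvALoop rest cur toks
        else pvALoop rest [] (toks ++ [PySem.Chars.strip cur])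
      else pvALoop rest (cur ++ [c]) toks
termination_by cs _ _ => cs.length
decreasing_by
  all_goals first
    | (simp; done)
    | (have h := pvAQuote_snd_le rest
       rw [hq] at h; simp at h; simp; omega)

def parse_query_components_py (query : String) : List (String × List String) :=
  let q := PySem.Chars.replace (PySem.Chars.replace query.toList ['('] [' ', '(', ' '])
             [')'] [' ', ')', ' ']
  [("tokens", (pvALoop q [] []).map (fun t => String.mk t))]

-- ===== PORT B =====
-- one maximal match of the regex (?:"[^"]*"?|[^ \t\n])+ at the start of cs, plus the remainder
-- ("[^"]*"? = quote, greedy non-quotes, optional closing quote; hand-ported: Lean has no regex engine)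
def pvBMatch : List Char → List Char × List Char
  | [] => ([], [])
  | c :: rest =>
      if c = '"' then
        match hd : rest.dropWhile (· ≠ '"') with
        | [] => (c :: rest.takeWhile (· ≠ '"'), [])
        | q :: rest' => ((c :: (rest.takeWhile (· ≠ '"') ++ q :: (pvBMatch rest').1)), (pvBMatch rest').2)
      else if pvSep c then ([], c :: rest)
      else ((pvBMatch rest).1.cons c, (pvBMatch rest).2)
termination_by cs => cs.length
decreasing_by
  all_goals first
    | (simp; done)
    | (have h := List.length_dropWhile_le (fun c => decide ¬c = '"') rest
       rw [hd] at h; simp at h; simp; omega)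

-- unfolding equations for pvBMatch (its dependent match needs `split`); used by the
-- termination lemmas of pvBFindAll below, hence stated here
theorem pvBMatch_nil : pvBMatch [] = ([], []) := by rw [pvBMatch]

theorem pvBMatch_quote_nil (rest : List Char) (hd : rest.dropWhile (· ≠ '"') = []) :
    pvBMatch ('"' :: rest) = ('"' :: rest.takeWhile (· ≠ '"'), []) := by
  rw [pvBMatch]
  split
  next _ =>
    split
    next => rfl
    next q' rs heq => rw [hd] at heq; cases heq
  next h => simp at h

theorem pvBMatch_quote_cons (rest : List Char) (q : Char) (rest' : List Char)
    (hd : rest.dropWhile (· ≠ '"') = q :: rest') :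
    pvBMatch ('"' :: rest) =
      ('"' :: (rest.takeWhile (· ≠ '"') ++ q :: (pvBMatch rest').1), (pvBMatch rest').2) := by
  rw [pvBMatch]
  split
  next _ =>
    split
    next heq => rw [hd] at heq; cases heq
    next q' rs heq =>
      rw [hd] at heq
      injection heq with h1 h2
      subst h1; subst h2; rfl
  next h => simp at h

theorem pvBMatch_sep (c : Char) (rest : List Char) (hq : ¬ c = '"') (hs : pvSep c = true) :
    pvBMatch (c :: rest) = ([], c :: rest) := by
  rw [pvBMatch]; simp [hq, hs]

theorem pvBMatch_other (c : Char) (rest : List Char) (hq : ¬ c = '"') (hs : pvSep c = false) :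
    pvBMatch (c :: rest) = (c :: (pvBMatch rest).1, (pvBMatch rest).2) := by
  rw [pvBMatch]; simp [hq, hs]

-- termination lemmas for pvBFindAll (cited in its decreasing_by)
theorem pvBMatch_snd_le (cs : List Char) : (pvBMatch cs).2.length ≤ cs.length := by
  induction cs using pvBMatch.induct with
  | case1 => simp [pvBMatch_nil]
  | case2 rest hd => simp [pvBMatch_quote_nil rest hd]
  | case3 rest q rest' hd ih =>
    have hl := List.length_dropWhile_le (fun c => decide ¬c = '"') rest
    rw [hd] at hl; simp at hl
    rw [pvBMatch_quote_cons rest q rest' hd]; simp; omega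
  | case4 c rest hq hs => rw [pvBMatch_sep c rest hq (by simpa using hs)]
  | case5 c rest hq hs ih =>
    rw [pvBMatch_other c rest hq (by simpa using hs)]; simp; omega

theorem pvBMatch_snd_lt (c : Char) (rest : List Char) (h : pvSep c = false) :
    (pvBMatch (c :: rest)).2.length < (c :: rest).length := by
  by_cases hq : c = '"'
  · subst hq
    cases hd : rest.dropWhile (· ≠ '"') with
    | nil => rw [pvBMatch_quote_nil rest hd]; simp
    | cons q rest' =>
      have hl := List.length_dropWhile_le (fun c => decide ¬c = '"') rest
      rw [hd] at hl; simp at hl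
      have := pvBMatch_snd_le rest'
      rw [pvBMatch_quote_cons rest q rest' hd]; simp; omega
  · have := pvBMatch_snd_le rest
    rw [pvBMatch_other c rest hq h]; simp; omega

-- re.findall: scan, skipping positions where the pattern cannot match (separators)
def pvBFindAll : List Char → List (List Char)
  | [] => []
  | c :: rest =>
      if hs : pvSep c then pvBFindAll rest
      else (pvBMatch (c :: rest)).1 :: pvBFindAll (pvBMatch (c :: rest)).2
termination_by cs => cs.length
decreasing_by
  · simp
  · exact pvBMatch_snd_lt c rest (by simpa using hs)

def parse_query_components_py_alt (query : String) : List (String × List String) :=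
  let q := PySem.Chars.replace (PySem.Chars.replace query.toList ['('] [' ', '(', ' '])
             [')'] [' ', ')', ' ']
  [("tokens",
    ((pvBFindAll q).filter (fun t => !(PySem.Chars.strip t).isEmpty)).map
      (fun t => String.mk (PySem.Chars.strip t)))]

-- ===== PRECONDITION & SPEC =====
def Spec_parse_query_components_py (query : String) (out : List (String × List String)) : Prop := out = parse_query_components_py_alt query
instance (query : String) (out : List (String × List String)) : Decidable (Spec_parse_query_components_py query out) := by unfold Spec_parse_query_components_py; infer_instance

-- ===== CLAIM (what is proved, stated in full; the proofs are below) =====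
def Claim_equal_parse_query_components_py : Prop := ∀ (query : String), Dom_parse_query_components_py query → Spec_parse_query_components_py query (parse_query_components_py query)

-- ===== LEMMAS AND PROOFS =====

-- B's tokens before the String.mk conversion
def pvG (cs : List Char) : List (List Char) :=
  ((pvBFindAll cs).filter (fun t => !(PySem.Chars.strip t).isEmpty)).map PySem.Chars.strip

theorem pvAQuote_eq (cs : List Char) :
    pvAQuote cs = (cs.takeWhile (· ≠ '"'), cs.dropWhile (· ≠ '"')) := by
  induction cs with
  | nil => simp [pvAQuote]
  | cons c rest ih =>
    by_cases h : c = '"' <;> simp [pvAQuote, h, ih, List.takeWhile_cons, List.dropWhile_cons]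

-- unfolding equations for pvALoop (its dependent match needs `split`)
theorem pvALoop_nil (cur : List Char) (toks : List (List Char)) :
    pvALoop [] cur toks =
      if PySem.Chars.strip cur = [] then toks else toks ++ [PySem.Chars.strip cur] := by
  rw [pvALoop]

theorem pvALoop_quote_nil (rest cur : List Char) (toks : List (List Char))
    (hd : rest.dropWhile (· ≠ '"') = []) :
    pvALoop ('"' :: rest) cur toks =
      pvALoop [] (cur ++ '"' :: rest.takeWhile (· ≠ '"')) toks := by
  conv_lhs => rw [pvALoop]
  split
  next _ =>
    split
    next mid heq =>
      rw [pvAQuote_eq] at heq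
      injection heq with h1 h2
      subst h1; rfl
    next mid q rest' heq =>
      rw [pvAQuote_eq] at heq
      injection heq with h1 h2
      rw [hd] at h2; cases h2
  next h => simp at h

theorem pvALoop_quote_cons (rest : List Char) (q : Char) (rest' cur : List Char)
    (toks : List (List Char)) (hd : rest.dropWhile (· ≠ '"') = q :: rest') :
    pvALoop ('"' :: rest) cur toks =
      pvALoop rest' (cur ++ '"' :: (rest.takeWhile (· ≠ '"') ++ [q])) toks := by
  conv_lhs => rw [pvALoop]
  split
  next _ =>
    split
    next mid heq =>
      rw [pvAQuote_eq] at heq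
      injection heq with h1 h2
      rw [hd] at h2; cases h2
    next mid q' rs heq =>
      rw [pvAQuote_eq] at heq
      injection heq with h1 h2
      rw [hd] at h2
      injection h2 with h3 h4
      subst h1; subst h3; subst h4; rfl
  next h => simp at h

theorem pvALoop_sep (c : Char) (rest cur : List Char) (toks : List (List Char))
    (hq : ¬ c = '"') (hs : pvSep c = true) :
    pvALoop (c :: rest) cur toks =
      if PySem.Chars.strip cur = [] then pvALoop rest cur toks
      else pvALoop rest [] (toks ++ [PySem.Chars.strip cur]) := by
  rw [pvALoop]; simp [hq, hs]

theorem pvALoop_char (c : Char) (rest cur : List Char) (toks : List (List Char))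
    (hq : ¬ c = '"') (hs : pvSep c = false) :
    pvALoop (c :: rest) cur toks = pvALoop rest (cur ++ [c]) toks := by
  rw [pvALoop]; simp [hq, hs]

-- a string whose strip is empty is all whitespace
theorem pvStrip_nil_all (cur : List Char) (h : PySem.Chars.strip cur = []) :
    ∀ c ∈ cur, PySem.Chars.isspace c = true := by
  simp only [PySem.Chars.strip, PySem.Chars.rstrip, PySem.Chars.lstrip] at h
  rw [List.reverse_eq_nil_iff, List.dropWhile_eq_nil_iff] at h
  intro c hc
  rcases (List.takeWhile_append_dropWhile (p := PySem.Chars.isspace) (l := cur)) ▸ hc |> List.mem_append.mp with h1 | h2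
  · exact List.mem_takeWhile_imp h1
  · exact h c (by simpa using h2)

theorem pvStrip_append (cur m : List Char) (h : PySem.Chars.strip cur = []) :
    PySem.Chars.strip (cur ++ m) = PySem.Chars.strip m := by
  have hd : cur.dropWhile PySem.Chars.isspace = [] :=
    List.dropWhile_eq_nil_iff.mpr (pvStrip_nil_all cur h)
  simp only [PySem.Chars.strip, PySem.Chars.lstrip, List.dropWhile_append, hd]
  simp

-- the remainder of a match is empty or starts with a separator
theorem pvBMatch_stop (cs : List Char) :
    ∀ d r, (pvBMatch cs).2 = d :: r → pvSep d = true := by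
  induction cs using pvBMatch.induct with
  | case1 => simp [pvBMatch_nil]
  | case2 rest hd => simp [pvBMatch_quote_nil rest hd]
  | case3 rest q rest' hd ih => simpa [pvBMatch_quote_cons rest q rest' hd] using ih
  | case4 c rest hq hs =>
    rw [pvBMatch_sep c rest hq (by simpa using hs)]
    intro d r hdr
    cases hdr
    simpa using hs
  | case5 c rest hq hs ih => simpa [pvBMatch_other c rest hq (by simpa using hs)] using ih

-- L1: A's loop just accumulates one whole regex match
theorem pvL1 (n : Nat) : ∀ (cs cur : List Char) (toks : List (List Char)), cs.length ≤ n →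
    pvALoop cs cur toks = pvALoop (pvBMatch cs).2 (cur ++ (pvBMatch cs).1) toks := by
  induction n with
  | zero =>
    intro cs cur toks hn
    have hcs : cs = [] := List.length_eq_zero_iff.mp (by omega)
    subst hcs
    simp [pvBMatch_nil]
  | succ n ih =>
    intro cs cur toks hn
    match cs with
    | [] => simp [pvBMatch_nil]
    | c :: rest =>
      by_cases hq : c = '"'
      · subst hq
        cases hd : rest.dropWhile (· ≠ '"') with
        | nil =>
          rw [pvALoop_quote_nil rest cur toks hd, pvBMatch_quote_nil rest hd]
        | cons q rest' =>
          have hl := List.length_dropWhile_le (fun c => decide ¬c = '"') rest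
          rw [hd] at hl; simp at hl
          rw [pvALoop_quote_cons rest q rest' cur toks hd, pvBMatch_quote_cons rest q rest' hd]
          rw [ih rest' _ toks (by simp at hn; omega)]
          simp
      · by_cases hs : pvSep c
        · rw [pvALoop_sep c rest cur toks hq hs, pvBMatch_sep c rest hq hs]
          rw [pvALoop_sep c rest (cur ++ []) toks hq hs]
          simp
        · rw [pvALoop_char c rest cur toks hq (by simpa using hs),
              pvBMatch_other c rest hq (by simpa using hs)]
          rw [ih rest _ toks (by simp at hn; omega)]
          simp

-- pvG unfolding equations
theorem pvG_nil : pvG [] = [] := by simp [pvG, pvBFindAll]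

theorem pvG_sep (c : Char) (rest : List Char) (hs : pvSep c = true) :
    pvG (c :: rest) = pvG rest := by simp [pvG, pvBFindAll, hs]

theorem pvG_tok (c : Char) (rest : List Char) (hs : pvSep c = false) :
    pvG (c :: rest) =
      (if PySem.Chars.strip (pvBMatch (c :: rest)).1 = [] then []
       else [PySem.Chars.strip (pvBMatch (c :: rest)).1])
        ++ pvG (pvBMatch (c :: rest)).2 := by
  rw [pvG, pvBFindAll]
  simp only [hs]
  by_cases h : PySem.Chars.strip (pvBMatch (c :: rest)).1 = [] <;>
    simp [h, pvG, List.isEmpty_iff]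

-- L2: from any all-whitespace carry, A's loop produces B's stripped, filtered matches
theorem pvL2 (n : Nat) : ∀ (cs cur : List Char) (toks : List (List Char)), cs.length ≤ n →
    PySem.Chars.strip cur = [] → pvALoop cs cur toks = toks ++ pvG cs := by
  induction n with
  | zero =>
    intro cs cur toks hn hcur
    have hcs : cs = [] := List.length_eq_zero_iff.mp (by omega)
    subst hcs
    simp [pvALoop_nil, hcur, pvG_nil]
  | succ n ih =>
    intro cs cur toks hn hcur
    match cs with
    | [] => simp [pvALoop_nil, hcur, pvG_nil]
    | c :: rest =>
      by_cases hs : pvSep c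
      · -- separator: A keeps the (all-whitespace) carry, B skips the position
        have hne : ¬ c = '"' := by
          rcases (by simpa [pvSep] using hs : (c = ' ' ∨ c = '\t') ∨ c = '\n') with (h|h)|h <;> simp [h]
        rw [pvALoop_sep c rest cur toks hne hs, if_pos hcur,
            ih rest cur toks (by simp at hn; omega) hcur, pvG_sep c rest hs]
      · -- a match starts here
        have hsf : pvSep c = false := by simpa using hs
        have hlt := pvBMatch_snd_lt c rest hsf
        rw [pvL1 (n+1) (c :: rest) cur toks hn]
        have hstrip : PySem.Chars.strip (cur ++ (pvBMatch (c :: rest)).1) =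
            PySem.Chars.strip (pvBMatch (c :: rest)).1 := pvStrip_append _ _ hcur
        rw [pvG_tok c rest hsf]
        cases hr : (pvBMatch (c :: rest)).2 with
        | nil =>
          by_cases hm : PySem.Chars.strip (pvBMatch (c :: rest)).1 = [] <;>
            simp [pvALoop_nil, hstrip, hm, pvG_nil]
        | cons d r' =>
          have hd : pvSep d = true := pvBMatch_stop (c :: rest) d r' hr
          have hdq : ¬ d = '"' := by
            rcases (by simpa [pvSep] using hd : (d = ' ' ∨ d = '\t') ∨ d = '\n') with (h|h)|h <;> simp [h]
          rw [hr] at hlt; simp at hlt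
          rw [pvALoop_sep d r' _ toks hdq hd]
          rw [hstrip]
          by_cases hm : PySem.Chars.strip (pvBMatch (c :: rest)).1 = []
          · rw [if_pos hm,
              ih r' (cur ++ (pvBMatch (c :: rest)).1) toks (by simp at hn; omega)
                (by rw [hstrip, hm]),
              pvG_sep d r' hd]
            simp [hm]
          · rw [if_neg hm,
              ih r' [] (toks ++ [PySem.Chars.strip (pvBMatch (c :: rest)).1])
                (by simp at hn; omega) (by decide),
              pvG_sep d r' hd]
            simp [hm]

-- ===== VERDICT (by name: the statement is the Claim_ definition above) =====
theorem pvMain (cs : List Char) :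
    (pvALoop cs [] []).map (fun t => String.mk t) =
      ((pvBFindAll cs).filter (fun t => !(PySem.Chars.strip t).isEmpty)).map
        (fun t => String.mk (PySem.Chars.strip t)) := by
  rw [pvL2 cs.length cs [] [] (le_refl _) (by decide)]
  simp [pvG, List.map_map]

theorem parse_query_components_py_spec : Claim_equal_parse_query_components_py := by
  intro query _
  unfold Spec_parse_query_components_py
  simp only [parse_query_components_py, parse_query_components_py_alt, pvMain]
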